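-- pv_equiv track=rewrite | github.com/AngelPuent3/Encuesta-Tkinter-Proyecto-Integrador | 4.-Proyecto Integrador/diagrama.py | resolverDiagrama
-- ===== SOURCE A (Python) =====
-- def resolverDiagrama(t, undo):
--     talloYhoja = list()
--     for i in t:
--         for e in undo:
--             d = str(e)
--             if(len(d) > 2):
--                 if(str(i) == d[:2]):
--                     ax = [i, 0]
--                     hojas = (int(d[1:3]))
--                     ax[1] = hojas
--                     talloYhoja.append(ax)
--             else:
--                 if(str(i) == d[0]):
--                     ax = [i, 0]
--                     hojas = (int(d[0:1]))
--                     ax[1] = hojas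
--                     talloYhoja.append(ax)
--
--     return talloYhoja
-- ===== SOURCE B (Python) =====
-- def _key_leaf(e):
--     # stem-key and leaf of one value, computed once
--     d = str(e)
--     if len(d) > 2:
--         return d[:2], int(d[1:3])
--     if d[0].isdigit():
--         return d[0], int(d[0])
--     return None
--
--
-- def resolverDiagrama(t, undo):
--     groups = {}
--     for kl in (_key_leaf(e) for e in undo):
--         if kl is not None:
--             groups.setdefault(kl[0], []).append(kl[1])
--     return [[i, leaf] for i in t for leaf in groups.get(str(i), [])]
-- ===== Notes on version B (the rewrite author's own statement) =====
-- stated objective: faster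
-- what changed: B computes each value's (stem-key, leaf) once, groups the leaves by stem-key in a dict in one pass over undo, and then builds the output with a single pass over t using dict lookups, instead of A's rescan of all of undo for every stem.
import Mathlib
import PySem

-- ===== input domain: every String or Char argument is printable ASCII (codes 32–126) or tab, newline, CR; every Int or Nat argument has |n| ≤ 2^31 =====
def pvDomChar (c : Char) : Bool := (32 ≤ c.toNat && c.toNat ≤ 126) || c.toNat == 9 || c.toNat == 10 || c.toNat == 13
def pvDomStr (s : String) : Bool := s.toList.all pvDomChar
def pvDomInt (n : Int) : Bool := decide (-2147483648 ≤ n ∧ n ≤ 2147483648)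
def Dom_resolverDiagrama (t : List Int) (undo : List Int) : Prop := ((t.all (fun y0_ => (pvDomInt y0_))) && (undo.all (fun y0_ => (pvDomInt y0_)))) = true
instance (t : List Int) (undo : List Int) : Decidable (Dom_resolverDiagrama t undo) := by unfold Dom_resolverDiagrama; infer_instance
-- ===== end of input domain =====

-- B replaces A's rescan of undo for every stem by one grouping pass over undo into a dict plus one pass over the stems.


-- ===== PORT A =====
def resolverDiagrama (t : List Int) (undo : List Int) : List (List Int) :=
  t.foldl (fun acc i =>
    undo.foldl (fun acc2 e =>
      let d := PySem.Int.toChars e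
      if 2 < d.length then
        if PySem.Int.toChars i = PySem.List.slice d none (some 2) then
          acc2 ++ [[i, (PySem.Int.ofChars? (PySem.List.slice d (some 1) (some 3))).getD 0]]
        else acc2
      else
        if PySem.Int.toChars i = PySem.List.slice d (some 0) (some 1) then
          acc2 ++ [[i, (PySem.Int.ofChars? (PySem.List.slice d (some 0) (some 1))).getD 0]]
        else acc2) acc) []

-- ===== PORT B =====
-- stem-key and leaf of one value (none = this value can never match a stem)
def rdKeyLeaf (e : Int) : Option (List Char × Int) :=
  let d := PySem.Int.toChars e
  if 2 < d.length then
    some (PySem.List.slice d none (some 2), (PySem.Int.ofChars? (PySem.List.slice d (some 1) (some 3))).getD 0)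
  else
    match d with
    | c :: _ => if c.isDigit then some ([c], (PySem.Int.ofChars? [c]).getD 0) else none
    | [] => none

def resolverDiagrama_alt (t : List Int) (undo : List Int) : List (List Int) :=
  let groups := (undo.filterMap rdKeyLeaf).foldl
      (fun d p => d.modify p.1 ([] : List Int) (· ++ [p.2])) PySem.Dict.empty
  t.flatMap (fun i => (groups.getD (PySem.Int.toChars i) []).map (fun leaf => [i, leaf]))

-- ===== PRECONDITION & SPEC =====
def Spec_resolverDiagrama (t : List Int) (undo : List Int) (out : List (List Int)) : Prop := out = resolverDiagrama_alt t undo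
instance (t : List Int) (undo : List Int) (out : List (List Int)) : Decidable (Spec_resolverDiagrama t undo out) := by unfold Spec_resolverDiagrama; infer_instance

-- ===== CLAIM (what is proved, stated in full; the proofs are below) =====
def Claim_equal_resolverDiagrama : Prop := ∀ (t : List Int) (undo : List Int), Dom_resolverDiagrama t undo → Spec_resolverDiagrama t undo (resolverDiagrama t undo)

-- ===== LEMMAS AND PROOFS =====

-- the row A appends for stem i and value e (none = no match)
def rowA (i : Int) (e : Int) : Option (List Int) :=
  let d := PySem.Int.toChars e
  if 2 < d.length then
    if PySem.Int.toChars i = PySem.List.slice d none (some 2) then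
      some [i, (PySem.Int.ofChars? (PySem.List.slice d (some 1) (some 3))).getD 0]
    else none
  else
    if PySem.Int.toChars i = PySem.List.slice d (some 0) (some 1) then
      some [i, (PySem.Int.ofChars? (PySem.List.slice d (some 0) (some 1))).getD 0]
    else none

-- A's inner-loop body, named (definitionally the lambda inside resolverDiagrama)
def stepA (i : Int) (acc2 : List (List Int)) (e : Int) : List (List Int) :=
  let d := PySem.Int.toChars e
  if 2 < d.length then
    if PySem.Int.toChars i = PySem.List.slice d none (some 2) then
      acc2 ++ [[i, (PySem.Int.ofChars? (PySem.List.slice d (some 1) (some 3))).getD 0]]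
    else acc2
  else
    if PySem.Int.toChars i = PySem.List.slice d (some 0) (some 1) then
      acc2 ++ [[i, (PySem.Int.ofChars? (PySem.List.slice d (some 0) (some 1))).getD 0]]
    else acc2

lemma resolver_eq_stepA (t undo : List Int) :
    resolverDiagrama t undo = t.foldl (fun acc i => undo.foldl (stepA i) acc) [] := rfl

lemma len_toDigitsCore (fuel : Nat) : ∀ (n : Nat) (ds : List Char),
    ds.length ≤ (Nat.toDigitsCore 10 fuel n ds).length := by
  induction fuel with
  | zero => intro n ds; simp [Nat.toDigitsCore]
  | succ f ih =>
    intro n ds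
    simp only [Nat.toDigitsCore]
    split
    · simp
    · exact le_trans (by simp) (ih (n / 10) (Nat.digitChar (n % 10) :: ds))

lemma mem_toDigitsCore (fuel : Nat) : ∀ (n : Nat) (ds : List Char) (c : Char),
    c ∈ Nat.toDigitsCore 10 fuel n ds → c ∈ ds ∨ c.isDigit := by
  have hd : ∀ m : Nat, m < 10 → (Nat.digitChar m).isDigit := by
    intro m hm; interval_cases m <;> decide
  induction fuel with
  | zero => intro n ds c h; simp only [Nat.toDigitsCore] at h; exact Or.inl h
  | succ f ih =>
    intro n ds c h
    simp only [Nat.toDigitsCore] at h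
    split at h
    · rcases List.mem_cons.mp h with h1 | h1
      · exact Or.inr (h1 ▸ hd _ (Nat.mod_lt _ (by norm_num)))
      · exact Or.inl h1
    · rcases ih _ _ _ h with h1 | h1
      · rcases List.mem_cons.mp h1 with h2 | h2
        · exact Or.inr (h2 ▸ hd _ (Nat.mod_lt _ (by norm_num)))
        · exact Or.inl h2
      · exact Or.inr h1

lemma toDigits_ne_nil (n : Nat) : Nat.toDigits 10 n ≠ [] := by
  have h : 1 ≤ (Nat.toDigits 10 n).length := by
    unfold Nat.toDigits
    simp only [Nat.toDigitsCore]
    split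
    · simp
    · simpa using len_toDigitsCore n (n / 10) [Nat.digitChar (n % 10)]
  intro hc; rw [hc] at h; simp at h

lemma isDigit_of_mem_toDigits (n : Nat) (c : Char) (h : c ∈ Nat.toDigits 10 n) : c.isDigit := by
  unfold Nat.toDigits at h
  rcases mem_toDigitsCore (n + 1) n [] c h with h1 | h1
  · simp at h1
  · exact h1

lemma toChars_ne_nil (i : Int) : PySem.Int.toChars i ≠ [] := by
  unfold PySem.Int.toChars
  split
  · simp
  · exact toDigits_ne_nil _

lemma toChars_head (e : Int) (c : Char) (rest : List Char)
    (h : PySem.Int.toChars e = c :: rest) : c.isDigit ∨ c = '-' := by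
  unfold PySem.Int.toChars at h
  split at h
  · injection h with h1 _
    exact Or.inr h1.symm
  · exact Or.inl (isDigit_of_mem_toDigits _ c (h ▸ List.mem_cons_self))

lemma toChars_ne_dash (i : Int) : PySem.Int.toChars i ≠ ['-'] := by
  intro h
  unfold PySem.Int.toChars at h
  split at h
  · injection h with _ h2
    exact toDigits_ne_nil _ h2
  · have : ('-').isDigit := isDigit_of_mem_toDigits _ _ (h ▸ List.mem_singleton_self _)
    exact absurd this (by decide)

lemma rowA_eq_bind (i e : Int) :
    rowA i e = (rdKeyLeaf e).bind
      (fun p => if p.1 = PySem.Int.toChars i then some [i, p.2] else none) := by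
  obtain ⟨c, rest, hd⟩ : ∃ c rest, PySem.Int.toChars e = c :: rest := by
    cases h : PySem.Int.toChars e with
    | nil => exact absurd h (toChars_ne_nil e)
    | cons c rest => exact ⟨c, rest, rfl⟩
  unfold rowA rdKeyLeaf
  simp only [hd]
  by_cases hlen : 2 < (c :: rest).length
  · simp only [if_pos hlen, Option.bind]
    by_cases hk : PySem.Int.toChars i = PySem.List.slice (c :: rest) none (some 2)
    · rw [if_pos hk, if_pos hk.symm]
    · rw [if_neg hk, if_neg fun h => hk h.symm]
  · have hsl : PySem.List.slice (c :: rest) (some 0) (some 1) = [c] := by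
      simp [pysem]
    simp only [if_neg hlen, hsl]
    by_cases hdig : c.isDigit
    · simp only [if_pos hdig, Option.bind]
      by_cases hk : PySem.Int.toChars i = [c]
      · rw [if_pos hk, if_pos hk.symm]
      · rw [if_neg hk, if_neg fun h => hk h.symm]
    · simp only [if_neg hdig, Option.bind]
      have hc : c = '-' := by
        rcases toChars_head e c rest hd with h1 | h1
        · exact absurd h1 hdig
        · exact h1
      subst hc
      rw [if_neg (toChars_ne_dash i)]

lemma stepA_toList (i : Int) (acc : List (List Int)) (e : Int) :
    stepA i acc e = acc ++ (rowA i e).toList := by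
  simp only [stepA, rowA]
  split_ifs <;> simp

lemma inner_foldl (i : Int) (undo : List Int) : ∀ acc : List (List Int),
    undo.foldl (stepA i) acc = acc ++ undo.filterMap (rowA i) := by
  induction undo with
  | nil => intro acc; simp
  | cons e us ih =>
    intro acc
    rw [List.foldl_cons, ih, stepA_toList, List.filterMap_cons]
    cases rowA i e <;> simp

lemma outer_foldl (undo : List Int) (t : List Int) : ∀ acc : List (List Int),
    t.foldl (fun acc i => undo.foldl (stepA i) acc) acc
      = acc ++ t.flatMap (fun i => undo.filterMap (rowA i)) := by
  induction t with
  | nil => intro acc; simp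
  | cons i ts ih =>
    intro acc
    rw [List.foldl_cons, ih, inner_foldl, List.flatMap_cons, List.append_assoc]

lemma rows_eq_groups (i : Int) (undo : List Int) :
    undo.filterMap (rowA i)
      = (((undo.filterMap rdKeyLeaf).filter (fun p => p.1 == PySem.Int.toChars i)).map (·.2)).map
          (fun leaf => [i, leaf]) := by
  induction undo with
  | nil => rfl
  | cons e us ih =>
    cases h : rdKeyLeaf e with
    | none =>
      have hf : rowA i e = none := by rw [rowA_eq_bind, h]; rfl
      rw [List.filterMap_cons_none hf, List.filterMap_cons_none h]
      exact ih
    | some p =>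
      have hb : rowA i e = if p.1 = PySem.Int.toChars i then some [i, p.2] else none := by
        rw [rowA_eq_bind, h]; rfl
      rw [List.filterMap_cons_some h]
      by_cases hk : p.1 = PySem.Int.toChars i
      · have hf : rowA i e = some [i, p.2] := by rw [hb, if_pos hk]
        rw [List.filterMap_cons_some hf]
        simp [hk, ih]
      · have hf : rowA i e = none := by rw [hb, if_neg hk]
        rw [List.filterMap_cons_none hf]
        simp [hk, ih]

lemma groups_getD (undo : List Int) (i : Int) :
    ((undo.filterMap rdKeyLeaf).foldl
        (fun d p => d.modify p.1 ([] : List Int) (· ++ [p.2])) PySem.Dict.empty).getD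
      (PySem.Int.toChars i) []
      = ((undo.filterMap rdKeyLeaf).filter (fun p => p.1 == PySem.Int.toChars i)).map (·.2) := by
  rw [PySem.Dict.getD_foldl_modify_append]
  simp

-- ===== VERDICT (by name: the statement is the Claim_ definition above) =====
theorem resolverDiagrama_spec : Claim_equal_resolverDiagrama := by
  intro t undo _
  unfold Spec_resolverDiagrama resolverDiagrama_alt
  rw [resolver_eq_stepA, outer_foldl, List.nil_append]
  apply List.flatMap_congr  -- pointwise equality of the per-stem rows
  intro i _
  rw [groups_getD, rows_eq_groups]
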